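-- pv_equiv track=rewrite | github.com/ookchan2/vbank-tracker | scripts/emailer.py | _bank_color
-- ===== SOURCE A (Python) =====
-- BANK_COLORS = {
--     "ZA Bank":      "#25CD9C",
--     "Mox Bank":     "#ec4899",
--     "WeLab Bank":   "#7c3aed",
--     "livi bank":    "#f97316",
--     "PAObank":      "#0ea5e9",
--     "Airstar Bank": "#06b6d4",
--     "Fusion Bank":  "#14b8a6",
--     "Ant Bank":     "#1677ff",
-- }
--
-- _BANK_NAME_GENERIC = {'bank', 'banking', 'digital', 'virtual', 'bank hk', ''}
--
-- def _bank_color(bank_name: str) -> str: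
--     """
--     Exact match first, then bidirectional substring match.
--     The exact-first check prevents 'ZA Bank' matching 'Ant Bank' via substring
--     when the lookup table key 'ZA Bank' is checked against 'Ant Bank'.
--     """
--     name_lower = (bank_name or '').lower().strip()
--     if name_lower in _BANK_NAME_GENERIC:
--         return '#6b7280'
--     # Exact match
--     for key, color in BANK_COLORS.items():
--         if key.lower() == name_lower:
--             return color
--     # Bidirectional substring fallback
--     for key, color in BANK_COLORS.items():
--         key_lower = key.lower()
--         if key_lower in name_lower or name_lower in key_lower:
--             return color
--     return '#6b7280'
-- ===== SOURCE B (Python) =====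
-- BANK_COLORS = {
--     "ZA Bank":      "#25CD9C",
--     "Mox Bank":     "#ec4899",
--     "WeLab Bank":   "#7c3aed",
--     "livi bank":    "#f97316",
--     "PAObank":      "#0ea5e9",
--     "Airstar Bank": "#06b6d4",
--     "Fusion Bank":  "#14b8a6",
--     "Ant Bank":     "#1677ff",
-- }
--
-- _BANK_NAME_GENERIC = {'bank', 'banking', 'digital', 'virtual', 'bank hk', ''}
--
-- def _bank_color(bank_name: str) -> str:
--     """Single pass: exact match returns immediately; first substring match is
--     remembered as a candidate and used only if no exact match exists."""
--     name_lower = (bank_name or '').lower().strip()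
--     if name_lower in _BANK_NAME_GENERIC:
--         return '#6b7280'
--     candidate = None
--     for key, color in BANK_COLORS.items():
--         key_lower = key.lower()
--         if key_lower == name_lower:
--             return color
--         if candidate is None and (key_lower in name_lower or name_lower in key_lower):
--             candidate = color
--     return candidate if candidate is not None else '#6b7280'
-- ===== Notes on version B (the rewrite author's own statement) =====
-- stated objective: alternative
-- what changed: Fuses A's two separate loops over BANK_COLORS into one pass that returns on an exact match immediately and records the first substring match in a candidate variable used only after the loop.
import Mathlib
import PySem

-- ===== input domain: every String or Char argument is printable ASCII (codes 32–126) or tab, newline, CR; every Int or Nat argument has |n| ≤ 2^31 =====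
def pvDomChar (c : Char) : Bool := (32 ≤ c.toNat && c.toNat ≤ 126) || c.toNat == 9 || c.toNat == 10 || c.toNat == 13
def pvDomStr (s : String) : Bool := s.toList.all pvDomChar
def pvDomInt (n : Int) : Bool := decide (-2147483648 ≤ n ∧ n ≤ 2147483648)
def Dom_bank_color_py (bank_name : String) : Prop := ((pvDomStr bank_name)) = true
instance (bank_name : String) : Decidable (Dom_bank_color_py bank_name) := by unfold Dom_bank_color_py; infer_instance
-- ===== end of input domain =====

-- B fuses A's two loops into one pass with a substring-match candidate; equivalence of the return values is proved.

-- ===== PORT A =====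
def pvBankColors : List (String × String) :=
  [("ZA Bank", "#25CD9C"), ("Mox Bank", "#ec4899"), ("WeLab Bank", "#7c3aed"),
   ("livi bank", "#f97316"), ("PAObank", "#0ea5e9"), ("Airstar Bank", "#06b6d4"),
   ("Fusion Bank", "#14b8a6"), ("Ant Bank", "#1677ff")]

def pvBankGeneric : List String := ["bank", "banking", "digital", "virtual", "bank hk", ""]

-- first loop of A: first key with key.lower() == name_lower
def pvExactLoop : List (String × String) → String → Option String
  | [], _ => none
  | (k, c) :: rest, n => if PySem.Str.lower k == n then some c else pvExactLoop rest n

-- second loop of A: first bidirectional substring match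
def pvSubLoop : List (String × String) → String → Option String
  | [], _ => none
  | (k, c) :: rest, n =>
    let kl := PySem.Str.lower k
    if PySem.Str.isIn kl n || PySem.Str.isIn n kl then some c else pvSubLoop rest n

def bank_color_py (bank_name : String) : String :=
  let name_lower := PySem.Str.strip (PySem.Str.lower bank_name)
  if pvBankGeneric.contains name_lower then "#6b7280"
  else
    match pvExactLoop pvBankColors name_lower with
    | some c => c
    | none =>
      match pvSubLoop pvBankColors name_lower with
      | some c => c
      | none => "#6b7280"

-- ===== PORT B =====
-- B's single loop: exact match returns at once, first substring match is kept as candidate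
def pvOneLoop : List (String × String) → String → Option String → String
  | [], _, cand => cand.getD "#6b7280"
  | (k, c) :: rest, n, cand =>
    let kl := PySem.Str.lower k
    if kl == n then c
    else
      pvOneLoop rest n
        (if cand.isNone && (PySem.Str.isIn kl n || PySem.Str.isIn n kl) then some c else cand)

def bank_color_py_alt (bank_name : String) : String :=
  let name_lower := PySem.Str.strip (PySem.Str.lower bank_name)
  if pvBankGeneric.contains name_lower then "#6b7280"
  else pvOneLoop pvBankColors name_lower none

-- ===== PRECONDITION & SPEC =====
def Spec_bank_color_py (bank_name : String) (out : String) : Prop := out = bank_color_py_alt bank_name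
instance (bank_name : String) (out : String) : Decidable (Spec_bank_color_py bank_name out) := by unfold Spec_bank_color_py; infer_instance

-- ===== CLAIM (what is proved, stated in full; the proofs are below) =====
def Claim_equal_bank_color_py : Prop := ∀ (bank_name : String), Dom_bank_color_py bank_name → Spec_bank_color_py bank_name (bank_color_py bank_name)

-- ===== LEMMAS AND PROOFS =====
-- The one-pass loop equals exact-first-then-substring, for any table, name and pending candidate.
theorem pvOneLoop_eq (l : List (String × String)) (n : String) (cand : Option String) :
    pvOneLoop l n cand =
      match pvExactLoop l n with
      | some c => c
      | none =>
        match cand with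
        | some c => c
        | none => (pvSubLoop l n).getD "#6b7280" := by
  induction l generalizing cand with
  | nil => cases cand <;> simp [pvOneLoop, pvExactLoop, pvSubLoop]
  | cons p rest ih =>
    obtain ⟨k, c⟩ := p
    simp only [pvOneLoop, pvExactLoop, pvSubLoop]
    by_cases hx : (PySem.Str.lower k == n) = true
    · simp [hx]
    · simp only [hx, if_false, Bool.false_eq_true, ih]
      cases cand <;> split <;> (try split) <;> simp_all

-- ===== VERDICT (by name: the statement is the Claim_ definition above) =====
theorem bank_color_py_spec : Claim_equal_bank_color_py := by
  intro bank_name _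
  unfold Spec_bank_color_py bank_color_py bank_color_py_alt
  dsimp only
  rw [pvOneLoop_eq]
  split
  · rfl
  · cases pvExactLoop pvBankColors (PySem.Str.strip (PySem.Str.lower bank_name)) <;>
      cases pvSubLoop pvBankColors (PySem.Str.strip (PySem.Str.lower bank_name)) <;> rfl
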